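-- pv_equiv track=rewrite | github.com/seojihwan/algorithm | Python/2020 naver/intern/3.py | solution
-- ===== SOURCE A (Python) =====
-- def solution(S, C):
--     length = len(S)
--     s, e = 0, 1
--     answer = 0
--     while s < length and e < length:
--         if S[s] == S[e]:
--             if C[s] > C[e]:
--                 answer += C[e]
--                 C[e] = C[s]
--             else:
--                 answer += C[s]
--         s = e
--         e += 1
--
--     return answer
-- ===== SOURCE B (Python) =====
-- def solution(S, C):
--     # Run-based reformulation: for each maximal run of equal adjacent items,
--     # the answer gains sum(run costs) - max(run costs).  (A mutates C in place;
--     # B does not -- the equivalence claimed is about the return value only.)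
--     n = len(S)
--     answer = 0
--     i = 0
--     while i < n:
--         j = i + 1
--         while j < n and S[j] == S[i]:
--             j += 1
--         if j - i > 1:
--             run = C[i:j]
--             answer += sum(run) - max(run)
--         i = j
--     return answer
-- ===== Notes on version B (the rewrite author's own statement) =====
-- stated objective: alternative
-- what changed: A scans adjacent pairs while threading a running maximum through C by in-place mutation; B instead detects each maximal run of equal adjacent items and adds sum(run costs) - max(run costs) per run, with no mutation of C.
import Mathlib
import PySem

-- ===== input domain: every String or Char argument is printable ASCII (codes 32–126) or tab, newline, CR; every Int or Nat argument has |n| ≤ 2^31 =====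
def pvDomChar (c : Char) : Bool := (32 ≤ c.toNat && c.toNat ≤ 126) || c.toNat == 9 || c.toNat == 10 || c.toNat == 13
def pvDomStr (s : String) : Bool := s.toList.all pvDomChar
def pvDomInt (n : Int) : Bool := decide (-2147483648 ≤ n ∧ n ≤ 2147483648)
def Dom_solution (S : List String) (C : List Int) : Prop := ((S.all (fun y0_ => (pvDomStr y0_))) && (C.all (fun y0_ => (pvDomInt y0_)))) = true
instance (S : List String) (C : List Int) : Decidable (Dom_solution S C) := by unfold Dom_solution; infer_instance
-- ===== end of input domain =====

-- B replaces A's pairwise scan with a running in-place max by a per-run computation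
-- sum(run) - max(run); return values agree (A mutates C in place, B does not — the
-- claim is about the return value only).

-- ===== PORT A =====
-- one iteration of A's while loop (s = e - 1 throughout); C[s]/C[e] are ported with
-- pyGetD 0 and C[e] = C[s] with List.set — exact because Pre_solution puts every index
-- A actually reads/writes in range; S[s]/S[e] are in range by the loop condition.
def stepA (S : List String) (p : List Int × Int) (e : Int) : List Int × Int :=
  let s := e - 1
  if PySem.List.pyGetD S s "" = PySem.List.pyGetD S e "" then
    let cs := PySem.List.pyGetD p.1 s 0
    let ce := PySem.List.pyGetD p.1 e 0
    if cs > ce then (p.1.set e.toNat cs, p.2 + ce)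
    else (p.1, p.2 + cs)
  else p

def solution (S : List String) (C : List Int) : Int :=
  ((PySem.List.pyRange 1 (S.length : Int) 1).foldl (stepA S) (C, 0)).2

-- ===== PORT B =====
-- inner while loop of B: extend j while j < n and S[j] == S[i]
def runEndB (S : List String) (x : String) (j : Nat) : Nat :=
  if h : j < S.length then
    if S[j] = x then runEndB S x (j + 1) else j
  else j
termination_by S.length - j

-- cited by solBrec's decreasing_by
theorem runEndB_ge (S : List String) (x : String) (j : Nat) : j ≤ runEndB S x j := by
  fun_induction runEndB S x j with
  | case1 j h heq ih => omega
  | case2 j h heq => rfl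
  | case3 j h => rfl

-- outer while loop of B; max(run) is ported with max?.getD 0 — exact because under
-- Pre_solution the run slice is nonempty whenever it is taken.
def solBrec (S : List String) (C : List Int) (i : Nat) (answer : Int) : Int :=
  if h : i < S.length then
    let j := runEndB S (S[i]) (i + 1)
    let answer' :=
      if 1 < j - i then
        let run := PySem.List.slice C (some (i : Int)) (some (j : Int))
        answer + run.sum - (PySem.List.max? run (fun y => y)).getD 0
      else answer
    solBrec S C j answer'
  else answer
termination_by S.length - i
decreasing_by
  have := runEndB_ge S (S[i]) (i + 1)
  omega

def solution_alt (S : List String) (C : List Int) : Int := solBrec S C 0 0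

-- ===== PRECONDITION & SPEC =====
-- Pre_solution: exactly the inputs where A returns — every adjacent equal pair of S
-- has its second index inside C (otherwise A raises IndexError at C[e]).
def Pre_solution (S : List String) (C : List Int) : Prop :=
  ∀ i < S.length, (S[i]? = S[i+1]? → i + 1 < C.length)
instance (S : List String) (C : List Int) : Decidable (Pre_solution S C) := by
  unfold Pre_solution; infer_instance

def pvWitness_solution : List String × List Int := (["a", "a", "b"], [3, 1, 5])

def Spec_solution (S : List String) (C : List Int) (out : Int) : Prop := out = solution_alt S C
instance (S : List String) (C : List Int) (out : Int) : Decidable (Spec_solution S C out) := by unfold Spec_solution; infer_instance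

-- ===== CLAIM (what is proved, stated in full; the proofs are below) =====
def Claim_equal_solution : Prop := ∀ (S : List String) (C : List Int), Dom_solution S C → Pre_solution S C → Spec_solution S C (solution S C)

-- ===== LEMMAS AND PROOFS =====

theorem runEndB_le (S : List String) (x : String) (j : Nat) (h : j ≤ S.length) :
    runEndB S x j ≤ S.length := by
  fun_induction runEndB S x j with
  | case1 j h' heq ih => exact ih (by omega)
  | case2 j h' heq => exact h
  | case3 j h' => exact h

theorem runEndB_run (S : List String) (x : String) (j : Nat) :
    ∀ t, j ≤ t → t < runEndB S x j → S[t]? = some x := by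
  fun_induction runEndB S x j with
  | case1 j h heq ih =>
      intro t ht1 ht2
      rcases Nat.eq_or_lt_of_le ht1 with h' | h'
      · subst h'; simp [List.getElem?_eq_getElem h, heq]
      · exact ih t h' ht2
  | case2 j h heq => intro t ht1 ht2; omega
  | case3 j h => intro t ht1 ht2; omega

theorem runEndB_boundary (S : List String) (x : String) (j : Nat)
    (h : runEndB S x j < S.length) : S[runEndB S x j]? ≠ some x := by
  fun_induction runEndB S x j with
  | case1 j hj heq ih => exact ih h
  | case2 j hj heq => simp [List.getElem?_eq_getElem hj, heq]
  | case3 j hj => omega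

theorem stepA_skip (S : List String) (p : List Int × Int) (k : Nat)
    (hk : 1 ≤ k) (hkn : k < S.length) (hne : S[k-1]? ≠ S[k]?) :
    stepA S p (k : Int) = p := by
  unfold stepA
  have hc : ((k:Int) - 1) = ((k-1 : Nat) : Int) := by omega
  rw [hc]
  have h1 : k - 1 < S.length := by omega
  simp only [pysem, List.getD, List.getElem?_eq_getElem h1, List.getElem?_eq_getElem hkn,
    Option.getD_some]
  rw [if_neg]
  intro h; apply hne
  simp [List.getElem?_eq_getElem h1, List.getElem?_eq_getElem hkn, h]

theorem stepA_gt (S : List String) (Cp : List Int) (a : Int) (k : Nat)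
    (hk : 1 ≤ k) (hkn : k < S.length) (hS : S[k-1]? = S[k]?)
    (cs ce : Int) (hcs : Cp[k-1]? = some cs) (hce : Cp[k]? = some ce) (hgt : cs > ce) :
    stepA S (Cp, a) (k : Int) = (Cp.set k cs, a + ce) := by
  unfold stepA
  have hc : ((k:Int) - 1) = ((k-1 : Nat) : Int) := by omega
  rw [hc]
  have h1 : k - 1 < S.length := by omega
  have hS' : S[k-1] = S[k] := by
    have := hS; rw [List.getElem?_eq_getElem h1, List.getElem?_eq_getElem hkn] at this
    exact Option.some.inj this
  simp only [pysem, List.getD, hcs, hce, List.getElem?_eq_getElem h1,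
    List.getElem?_eq_getElem hkn, Option.getD_some, hS']
  rw [if_pos hgt]
  simp

theorem stepA_le (S : List String) (Cp : List Int) (a : Int) (k : Nat)
    (hk : 1 ≤ k) (hkn : k < S.length) (hS : S[k-1]? = S[k]?)
    (cs ce : Int) (hcs : Cp[k-1]? = some cs) (hce : Cp[k]? = some ce) (hle : ¬ cs > ce) :
    stepA S (Cp, a) (k : Int) = (Cp, a + cs) := by
  unfold stepA
  have hc : ((k:Int) - 1) = ((k-1 : Nat) : Int) := by omega
  rw [hc]
  have h1 : k - 1 < S.length := by omega
  have hS' : S[k-1] = S[k] := by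
    have := hS; rw [List.getElem?_eq_getElem h1, List.getElem?_eq_getElem hkn] at this
    exact Option.some.inj this
  simp only [pysem, List.getD, hcs, hce, List.getElem?_eq_getElem h1,
    List.getElem?_eq_getElem hkn, Option.getD_some, hS']
  simp [hle]

theorem seg_cons (C : List Int) (k j : Nat) (h1 : k < j) (h2 : k < C.length) :
    (C.drop k).take (j - k) = C[k] :: (C.drop (k+1)).take (j - (k+1)) := by
  rw [List.drop_eq_getElem_cons h2]
  have : j - k = (j - (k+1)) + 1 := by omega
  rw [this, List.take_succ_cons]

-- the run lemma: A's fold across one maximal run, starting with running value m at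
-- position k-1, adds m + sum(C[k:j]) - max(m, C[k:j]) and leaves that max at C[j-1].
theorem run_fold (S : List String) (C : List Int) (x : String) :
    ∀ (d k j : Nat) (C0 : List Int) (ans m : Int),
    d = j - k → 1 ≤ k → k ≤ j → j ≤ S.length → j ≤ C.length →
    C0.length = C.length →
    (∀ t, k ≤ t → C0[t]? = C[t]?) →
    (∀ t, k - 1 ≤ t → t < j → S[t]? = some x) →
    C0[k-1]? = some m →
    ∃ C1 : List Int,
      C1.length = C.length ∧
      (∀ t, j ≤ t → C1[t]? = C[t]?) ∧
      C1[j-1]? = some (((C.drop k).take (j-k)).foldl max m) ∧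
      List.foldl (stepA S) (C0, ans) (PySem.List.pyRange (k : Int) (S.length : Int) 1) =
        List.foldl (stepA S) (C1, ans + m + ((C.drop k).take (j-k)).sum - ((C.drop k).take (j-k)).foldl max m)
          (PySem.List.pyRange (j : Int) (S.length : Int) 1) := by
  intro d
  induction d with
  | zero =>
    intro k j C0 ans m hd hk hkj hjn hjC hlen hagree hrun hm
    have hjk : j = k := by omega
    subst hjk
    refine ⟨C0, hlen, fun t ht => hagree t (by omega), ?_, ?_⟩
    · simpa using hm
    · simp
  | succ d ih =>
    intro k j C0 ans m hd hk hkj hjn hjC hlen hagree hrun hm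
    have hkj' : k < j := by omega
    have hkC : k < C.length := by omega
    have hkn : k < S.length := by omega
    have hS : S[k-1]? = S[k]? := by
      rw [hrun (k-1) (by omega) (by omega), hrun k (by omega) (by omega)]
    have hce : C0[k]? = some C[k] := by
      rw [hagree k le_rfl]; exact List.getElem?_eq_getElem hkC
    have hseg : (C.drop k).take (j - k) = C[k] :: (C.drop (k+1)).take (j - (k+1)) :=
      seg_cons C k j hkj' hkC
    rw [PySem.List.pyRange_one_cons (by exact_mod_cast hkn), List.foldl_cons]
    have hcast : ((k : Int) + 1) = ((k + 1 : Nat) : Int) := by push_cast; ring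
    by_cases hgt : m > C[k]
    · rw [stepA_gt S C0 ans k hk hkn hS m C[k] hm hce hgt, hcast]
      obtain ⟨C1, h1, h2, h3, h4⟩ := ih (k+1) j (C0.set k m) (ans + C[k]) m (by omega)
        (by omega) (by omega) hjn hjC (by simpa using hlen)
        (fun t ht => by rw [List.getElem?_set_ne (by omega)]; exact hagree t (by omega))
        (fun t ht1 ht2 => hrun t (by omega) ht2)
        (by simpa using List.getElem?_set_self (hlen ▸ hkC))
      have hmax : max m C[k] = m := max_eq_left (by omega)
      refine ⟨C1, h1, h2, ?_, ?_⟩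
      · rw [hseg, List.foldl_cons, hmax]; exact h3
      · rw [h4, hseg]
        congr 2
        simp [List.foldl_cons, hmax]
        ring
    · rw [stepA_le S C0 ans k hk hkn hS m C[k] hm hce hgt, hcast]
      obtain ⟨C1, h1, h2, h3, h4⟩ := ih (k+1) j C0 (ans + m) C[k] (by omega)
        (by omega) (by omega) hjn hjC hlen
        (fun t ht => hagree t (by omega))
        (fun t ht1 ht2 => hrun t (by omega) ht2)
        (by simpa using hce)
      have hmax : max m C[k] = C[k] := max_eq_right (by omega)
      refine ⟨C1, h1, h2, ?_, ?_⟩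
      · rw [hseg, List.foldl_cons, hmax]; exact h3
      · rw [h4, hseg]
        congr 2
        simp [List.foldl_cons, hmax]
        ring

theorem solBrec_stop (S : List String) (C : List Int) (i : Nat) (ans : Int)
    (hi : ¬ i < S.length) : solBrec S C i ans = ans := by
  conv_lhs => rw [solBrec.eq_def]
  simp [hi]

theorem solBrec_unfold (S : List String) (C : List Int) (i : Nat) (ans : Int)
    (hi : i < S.length) :
    solBrec S C i ans = solBrec S C (runEndB S (S[i]) (i+1))
      (if 1 < runEndB S (S[i]) (i+1) - i then
        ans + (PySem.List.slice C (some (i : Int)) (some ((runEndB S (S[i]) (i+1) : Nat) : Int))).sum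
          - (PySem.List.max? (PySem.List.slice C (some (i : Int)) (some ((runEndB S (S[i]) (i+1) : Nat) : Int))) (fun y => y)).getD 0
       else ans) := by
  conv_lhs => rw [solBrec.eq_def]
  simp only [dif_pos hi]

theorem outer (S : List String) (C : List Int) (hpre : Pre_solution S C) :
    ∀ (d i : Nat) (C0 : List Int) (ans : Int), d = S.length - i →
    C0.length = C.length → (∀ t, i ≤ t → C0[t]? = C[t]?) →
    (List.foldl (stepA S) (C0, ans) (PySem.List.pyRange ((i : Int) + 1) (S.length : Int) 1)).2
      = solBrec S C i ans := by
  intro d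
  induction d using Nat.strong_induction_on with
  | _ d ih =>
  intro i C0 ans hd hlen hagree
  by_cases hi : i < S.length
  case neg =>
    rw [solBrec_stop S C i ans hi,
      PySem.List.pyRange_one_eq_nil (by exact_mod_cast Nat.le_succ_of_le (by omega))]
    simp
  case pos =>
  have hx : S[i]? = some S[i] := List.getElem?_eq_getElem hi
  have hj1 : i + 1 ≤ runEndB S (S[i]) (i+1) := runEndB_ge S (S[i]) (i+1)
  have hjn : runEndB S (S[i]) (i+1) ≤ S.length := runEndB_le S (S[i]) (i+1) (by omega)
  have hrunt := runEndB_run S (S[i]) (i+1)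
  have hbound := runEndB_boundary S (S[i]) (i+1)
  set j := runEndB S (S[i]) (i+1) with hjdef
  rw [solBrec_unfold S C i ans hi, ← hjdef]
  have hrun : ∀ t, i ≤ t → t < j → S[t]? = some (S[i]) := by
    intro t ht1 ht2
    rcases Nat.eq_or_lt_of_le ht1 with h' | h'
    · subst h'; exact hx
    · exact hrunt t (by omega) ht2
  by_cases hj2 : 1 < j - i
  case neg =>
    -- run of length 1: j = i + 1; A skips the pair (i, i+1) (or the range is empty)
    have hji : j = i + 1 := by omega
    rw [if_neg hj2]
    by_cases hin : i + 1 < S.length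
    · have hskip : S[(i+1)-1]? ≠ S[i+1]? := by
        simp only [Nat.add_sub_cancel]
        rw [hx]
        intro h
        exact hbound (by omega) (by rw [hji]; exact h.symm)
      have hcast0 : ((i : Int) + 1) = ((i + 1 : Nat) : Int) := by push_cast; ring
      rw [PySem.List.pyRange_one_cons (by exact_mod_cast (by omega : i + 1 < S.length)),
        List.foldl_cons, hcast0, stepA_skip S (C0, ans) (i+1) (by omega) hin hskip,
        ih (S.length - (i+1)) (by omega) (i+1) C0 ans rfl hlen
          (fun t ht => hagree t (by omega)), hji]
    · have hIn : i + 1 = S.length := by omega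
      rw [PySem.List.pyRange_one_eq_nil (by exact_mod_cast (by omega : S.length ≤ i + 1))]
      rw [hji, solBrec_stop S C (i+1) ans (by omega)]
      simp
  case pos =>
    rw [if_pos hj2]
    have hjC : j ≤ C.length := by
      have h2n : j - 2 < S.length := by omega
      have := hpre (j-2) h2n
      have heq : S[j-2]? = S[j-2+1]? := by
        rw [hrun (j-2) (by omega) (by omega), hrun (j-2+1) (by omega) (by omega)]
      have := this heq
      omega
    have hiC : i < C.length := by omega
    have hm : C0[i]? = some C[i] := by
      rw [hagree i le_rfl]; exact List.getElem?_eq_getElem hiC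
    obtain ⟨C1, h1, h2, h3, h4⟩ := run_fold S C (S[i]) (j - (i+1)) (i+1) j C0 ans C[i]
      rfl (by omega) (by omega) hjn hjC hlen
      (fun t ht => hagree t (by omega))
      (fun t ht1 ht2 => hrun t (by omega) ht2)
      (by simpa using hm)
    have hcast : ((i : Int) + 1) = ((i + 1 : Nat) : Int) := by push_cast; ring
    rw [hcast, h4]
    -- identify B's per-run increment with A's accumulated answer
    have hslice : PySem.List.slice C (some (i : Int)) (some (j : Int))
        = C[i] :: (C.drop (i+1)).take (j - (i+1)) := by
      rw [PySem.List.slice_natCast, seg_cons C i j (by omega) hiC]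
    have hansB : ans + (PySem.List.slice C (some (i : Int)) (some (j : Int))).sum
        - (PySem.List.max? (PySem.List.slice C (some (i : Int)) (some (j : Int))) (fun y => y)).getD 0
        = ans + C[i] + ((C.drop (i+1)).take (j - (i+1))).sum
          - ((C.drop (i+1)).take (j - (i+1))).foldl max C[i] := by
      rw [hslice, PySem.List.max?_id_cons]
      simp only [List.sum_cons, Option.getD_some]
      ring
    rw [hansB]
    by_cases hjln : j < S.length
    · have hskip : S[j-1]? ≠ S[j]? := by
        rw [hrun (j-1) (by omega) (by omega)]
        intro h
        exact hbound hjln h.symm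
      rw [PySem.List.pyRange_one_cons (by exact_mod_cast hjln), List.foldl_cons,
        stepA_skip S _ j (by omega) hjln hskip]
      exact ih (S.length - j) (by omega) j C1 _ rfl h1 h2
    · rw [PySem.List.pyRange_one_eq_nil (by exact_mod_cast (by omega : S.length ≤ j)),
        solBrec_stop S C j _ hjln]
      simp

-- ===== VERDICT (by name: the statement is the Claim_ definition above) =====
theorem solution_spec : Claim_equal_solution := by
  intro S C _hdom hpre
  unfold Spec_solution solution solution_alt
  have h := outer S C hpre S.length 0 C 0 rfl rfl (fun t _ => rfl)
  simpa using h
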